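-- pv_equiv track=rewrite | github.com/honza-klu/acc_numbers | src/account_numbers.py | verify_number
-- ===== SOURCE A (Python) =====
-- def verify_number(acc_number, strict=True):
--     num = [int(i) for i in str(acc_number)]
--     if(len(num)>10 or len(num)<8):
--         return False
--         #raise Exception("Account number must be 8-10 digits long")
--     if(strict and len(num)==10 and num[0] in {1, 2, 9}):
--         return False #Fio restrictions
--     S = 1*num[-1] + 2*num[-2] + 4*num[-3] + 8*num[-4] + 5*num[-5] + 10*num[-6] + 9*num[-7] + 7*num[-8]
--     if(len(num)>8):
--         S += 3*num[-9]
--     if (len(num)>9):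
--         S += 6 * num[-10]
--     if(S%11==0):
--         return True
--     else:
--         return False
-- ===== SOURCE B (Python) =====
-- def verify_number(acc_number, strict=True):
--     n = acc_number
--     s, w, first, length = 0, 1, 0, 0
--     while n > 0:
--         n, d = divmod(n, 10)
--         s += w * d
--         w = w * 2 % 11
--         first = d
--         length += 1
--     if length > 10 or length < 8:
--         return False
--     if strict and length == 10 and first in (1, 2, 9):
--         return False
--     return s % 11 == 0
-- ===== Notes on version B (the rewrite author's own statement) =====
-- stated objective: alternative
-- what changed: B never converts the number to a string or builds a digit list: a single divmod loop over the integer accumulates the checksum with a doubling weight (2^k mod 11 reproduces A's weight table), the digit count and the leading digit, then applies the same guards.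
import Mathlib
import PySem

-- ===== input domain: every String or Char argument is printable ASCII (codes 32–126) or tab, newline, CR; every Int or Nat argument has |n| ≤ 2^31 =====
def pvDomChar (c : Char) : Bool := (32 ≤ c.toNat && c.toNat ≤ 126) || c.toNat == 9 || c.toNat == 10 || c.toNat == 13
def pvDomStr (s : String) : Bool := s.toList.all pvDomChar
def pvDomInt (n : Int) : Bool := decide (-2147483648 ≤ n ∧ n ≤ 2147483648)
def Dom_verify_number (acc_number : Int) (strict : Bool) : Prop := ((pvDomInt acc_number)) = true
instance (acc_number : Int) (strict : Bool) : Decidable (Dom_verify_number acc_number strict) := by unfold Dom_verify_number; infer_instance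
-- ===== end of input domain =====

-- B replaces A's string-based digit extraction and unrolled weighted sum by one divmod
-- loop on the integer that accumulates the checksum with a doubling weight (2^k mod 11),
-- the digit count and the leading digit (alternative decomposition, same cost).

-- ===== PORT A =====
-- num = [int(i) for i in str(acc_number)]; int(c) = c.toNat - 48, exact for digit chars
-- (Pre_ restricts to acc_number ≥ 0, where str(acc_number) is all digits; on negatives
-- Python's int('-') raises ValueError).
def pvDigits (acc_number : Int) : List Int :=
  (PySem.Int.toStr acc_number).toList.map (fun c => ((c.toNat : Int) - 48))

def verify_number (acc_number : Int) (strict : Bool) : Bool :=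
  let num := pvDigits acc_number
  if num.length > 10 ∨ num.length < 8 then false
  else if strict ∧ num.length = 10 ∧
      ((PySem.List.pyGet? num 0).getD 0 = 1 ∨ (PySem.List.pyGet? num 0).getD 0 = 2 ∨
       (PySem.List.pyGet? num 0).getD 0 = 9) then false
  else
    -- num[-k] is in range here (8 ≤ len ≤ 10), so pyGet? is some; getD 0 is exact
    let S : Int :=
      1 * (PySem.List.pyGet? num (-1)).getD 0 + 2 * (PySem.List.pyGet? num (-2)).getD 0 +
      4 * (PySem.List.pyGet? num (-3)).getD 0 + 8 * (PySem.List.pyGet? num (-4)).getD 0 +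
      5 * (PySem.List.pyGet? num (-5)).getD 0 + 10 * (PySem.List.pyGet? num (-6)).getD 0 +
      9 * (PySem.List.pyGet? num (-7)).getD 0 + 7 * (PySem.List.pyGet? num (-8)).getD 0
    let S := if num.length > 8 then S + 3 * (PySem.List.pyGet? num (-9)).getD 0 else S
    let S := if num.length > 9 then S + 6 * (PySem.List.pyGet? num (-10)).getD 0 else S
    if PySem.Int.mod S 11 = 0 then true else false

-- ===== PORT B =====
-- the while loop of Source B; its guard is 'n > 0', so the state n stays a natural number
-- (acc_number.toNat below realises that guard: for n ≤ 0 the loop body never runs);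
-- divmod(n, 10) on n > 0 is Nat division/remainder, 'w * 2 % 11' on w ≥ 0 is PySem.Int.mod
-- bLoopF is bLoop with a structural fuel counter: fuel ≥ n suffices (n shrinks by /10),
-- so bLoop runs it with fuel := n; this only makes the recursion kernel-reducible
def bLoopF : Nat → Nat → Int → Int → Int → Nat → Int × Int × Nat
  | 0, _, s, _, first, len => (s, first, len)
  | fuel + 1, n, s, w, first, len =>
    if n = 0 then (s, first, len)
    else bLoopF fuel (n / 10) (s + w * ((n % 10 : Nat) : Int))
          (PySem.Int.mod (w * 2) 11) ((n % 10 : Nat) : Int) (len + 1)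

def bLoop (n : Nat) (s w first : Int) (len : Nat) : Int × Int × Nat :=
  bLoopF n n s w first len

def verify_number_alt (acc_number : Int) (strict : Bool) : Bool :=
  let r := bLoop acc_number.toNat 0 1 0 0
  let s := r.1
  let first := r.2.1
  let len := r.2.2
  if len > 10 ∨ len < 8 then false
  else if strict ∧ len = 10 ∧ (first = 1 ∨ first = 2 ∨ first = 9) then false
  else PySem.Int.mod s 11 = 0

-- ===== PRECONDITION & SPEC =====
-- Pre_ excludes negative acc_number, on which Python A raises ValueError (int('-')).
def Pre_verify_number (acc_number : Int) (strict : Bool) : Prop := 0 ≤ acc_number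
instance (acc_number : Int) (strict : Bool) : Decidable (Pre_verify_number acc_number strict) := by unfold Pre_verify_number; infer_instance
def pvWitness_verify_number : Int × Bool := (19, true)

def Spec_verify_number (acc_number : Int) (strict : Bool) (out : Bool) : Prop := out = verify_number_alt acc_number strict
instance (acc_number : Int) (strict : Bool) (out : Bool) : Decidable (Spec_verify_number acc_number strict out) := by unfold Spec_verify_number; infer_instance

-- ===== CLAIM (what is proved, stated in full; the proofs are below) =====
def Claim_equal_verify_number : Prop := ∀ (acc_number : Int) (strict : Bool), Dom_verify_number acc_number strict → Pre_verify_number acc_number strict → Spec_verify_number acc_number strict (verify_number acc_number strict)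

-- ===== LEMMAS AND PROOFS =====

-- Nat.toDigitsCore characterised by Mathlib's Nat.digits (big-endian = reversed digits)
lemma toDigitsCore_eq (fuel : Nat) : ∀ (n : Nat) (acc : List Char), 0 < n → n ≤ fuel →
    Nat.toDigitsCore 10 fuel n acc = ((Nat.digits 10 n).reverse.map Nat.digitChar) ++ acc := by
  induction fuel with
  | zero => intro n acc h1 h2; omega
  | succ fuel ih =>
    intro n acc h1 h2
    rw [Nat.toDigitsCore]
    by_cases h : n / 10 = 0
    · have hn : n < 10 := by omega
      simp [h, Nat.digits_def' (by norm_num : 1 < 10) h1, Nat.digits_zero]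
    · have : n / 10 ≤ fuel := by omega
      simp only [h, if_false, ih (n / 10) _ (Nat.pos_of_ne_zero h) this]
      rw [Nat.digits_def' (by norm_num : 1 < 10) h1]
      simp

-- A's digit list, for a nonnegative input, is the reversed Mathlib digit list (cast to Int)
lemma pvDigits_eq (m : Nat) (hm : 0 < m) :
    pvDigits (m : Int) = (Nat.digits 10 m).reverse.map (fun d => Int.ofNat d) := by
  unfold pvDigits
  rw [PySem.Int.toList_toStr]
  have h0 : PySem.Int.toChars (m : Int) = Nat.toDigits 10 m := by
    simp [PySem.Int.toChars, Int.toNat_natCast, (by omega : ¬ ((m : Int) < 0))]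
  rw [h0, Nat.toDigits, toDigitsCore_eq (m + 1) m [] hm (by omega)]
  rw [List.append_nil, List.map_map]
  apply List.map_congr_left
  intro d hd
  have hd10 : d < 10 := Nat.digits_lt_base (by norm_num) (by simpa using List.mem_reverse.mp hd)
  interval_cases d <;> rfl

-- the weighted sum B's loop accumulates, as a function of the little-endian digit list
def wsum (w : Int) : List Nat → Int
  | [] => 0
  | d :: ds => w * (d : Int) + wsum (PySem.Int.mod (w * 2) 11) ds

lemma bLoopF_eq (fuel : Nat) : ∀ (n : Nat), n ≤ fuel → ∀ (s w first : Int) (len : Nat),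
    bLoopF fuel n s w first len =
      (s + wsum w (Nat.digits 10 n),
       ((Nat.digits 10 n).map (fun d => Int.ofNat d)).getLastD first,
       len + (Nat.digits 10 n).length) := by
  induction fuel with
  | zero => intro n hn s w first len; interval_cases n; simp [bLoopF, wsum]
  | succ fuel ih =>
    intro n hn s w first len
    rw [bLoopF]
    by_cases h : n = 0
    · simp [h, wsum]
    · simp only [h, if_false]
      rw [ih (n / 10) (by omega)]
      simp only [Nat.digits_def' (by norm_num : 1 < 10) (Nat.pos_of_ne_zero h), wsum,
        List.map_cons, List.getLastD_cons, List.length_cons, Prod.mk.injEq]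
      refine ⟨by ring, rfl, by omega⟩

lemma bLoop_eq (n : Nat) (s w first : Int) (len : Nat) :
    bLoop n s w first len =
      (s + wsum w (Nat.digits 10 n),
       ((Nat.digits 10 n).map (fun d => Int.ofNat d)).getLastD first,
       len + (Nat.digits 10 n).length) :=
  bLoopF_eq n n le_rfl s w first len

-- the crux: for ANY little-endian digit list D, A's guards-plus-unrolled-sum over the
-- big-endian list D.reverse agree with B's guards over (wsum, last digit, length)
lemma crux (D : List Nat) (strict : Bool) :
    (let num := D.reverse.map (fun d => Int.ofNat d)
     if num.length > 10 ∨ num.length < 8 then false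
     else if strict ∧ num.length = 10 ∧
         ((PySem.List.pyGet? num 0).getD 0 = 1 ∨ (PySem.List.pyGet? num 0).getD 0 = 2 ∨
          (PySem.List.pyGet? num 0).getD 0 = 9) then false
     else
       let S : Int :=
         1 * (PySem.List.pyGet? num (-1)).getD 0 + 2 * (PySem.List.pyGet? num (-2)).getD 0 +
         4 * (PySem.List.pyGet? num (-3)).getD 0 + 8 * (PySem.List.pyGet? num (-4)).getD 0 +
         5 * (PySem.List.pyGet? num (-5)).getD 0 + 10 * (PySem.List.pyGet? num (-6)).getD 0 +
         9 * (PySem.List.pyGet? num (-7)).getD 0 + 7 * (PySem.List.pyGet? num (-8)).getD 0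
       let S := if num.length > 8 then S + 3 * (PySem.List.pyGet? num (-9)).getD 0 else S
       let S := if num.length > 9 then S + 6 * (PySem.List.pyGet? num (-10)).getD 0 else S
       if PySem.Int.mod S 11 = 0 then true else false)
    =
    (let s := wsum 1 D
     let first := (D.map (fun d => Int.ofNat d)).getLastD 0
     let len := D.length
     if len > 10 ∨ len < 8 then false
     else if strict ∧ len = 10 ∧ (first = 1 ∨ first = 2 ∨ first = 9) then false
     else decide (PySem.Int.mod s 11 = 0)) := by
  rcases D with _ | ⟨a, _ | ⟨b, _ | ⟨c, _ | ⟨d, _ | ⟨e, _ | ⟨f, _ | ⟨g, _ | ⟨h, _ | ⟨i, _ | ⟨j, _ | ⟨k, rest⟩⟩⟩⟩⟩⟩⟩⟩⟩⟩⟩ <;>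
    simp [wsum, PySem.List.pyGet?, PySem.List.pyIdx?, PySem.Int.mod] <;> ring_nf

theorem verify_number_eq (acc_number : Int) (strict : Bool)
    (hpre : 0 ≤ acc_number) :
    verify_number acc_number strict = verify_number_alt acc_number strict := by
  obtain ⟨m, rfl⟩ : ∃ m : Nat, acc_number = (m : Int) :=
    ⟨acc_number.toNat, (Int.toNat_of_nonneg hpre).symm⟩
  by_cases hm : m = 0
  · subst hm; cases strict <;> decide
  · unfold verify_number verify_number_alt
    rw [pvDigits_eq m (Nat.pos_of_ne_zero hm), Int.toNat_natCast,
        bLoop_eq m 0 1 0 0]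
    simpa using crux (Nat.digits 10 m) strict

-- ===== VERDICT (by name: the statement is the Claim_ definition above) =====
theorem verify_number_spec : Claim_equal_verify_number := by
  intro acc strict _ hpre
  unfold Spec_verify_number
  exact verify_number_eq acc strict hpre
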